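-- pv_equiv track=rewrite | github.com/laudzakusuma/LEONA | backend/plugins/smart_home_plugin.py | _extract_device
-- ===== SOURCE A (Python) =====
-- def _extract_device(command: str) -> str:
--     """Extract device name from command"""
--     # Simple extraction - enhance with entity recognition
--     words = command.lower().split()
--     device_keywords = ['light', 'lights', 'lamp', 'switch', 'thermostat', 'door', 'camera']
--
--     for i, word in enumerate(words):
--         if word in device_keywords:
--             # Get preceding words as device location
--             location = ' '.join(words[max(0, i-2):i])
--             return f"{location} {word}".strip()
--
--     return "device"
-- ===== SOURCE B (Python) =====
-- def _extract_device(command: str) -> str: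
--     """Extract device name from command (keyword-major scan: find each keyword's
--     first position in the word list and keep the earliest one)."""
--     words = command.lower().split()
--     best = None  # (index, keyword) with the smallest index seen so far
--     for kw in ['light', 'lights', 'lamp', 'switch', 'thermostat', 'door', 'camera']:
--         if kw in words:
--             i = words.index(kw)
--             if best is None or i < best[0]:
--                 best = (i, kw)
--     if best is None:
--         return "device"
--     i, w = best
--     return f"{' '.join(words[max(0, i-2):i])} {w}".strip()
-- ===== Notes on version B (the rewrite author's own statement) =====
-- stated objective: alternative
-- what changed: B transposes the loops: instead of scanning words left-to-right and testing each against the keyword list, it iterates over the fixed keyword list, takes each keyword's first position via list.index, keeps the (index, keyword) pair with the smallest index, and rebuilds the result from that pair.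
import Mathlib
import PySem

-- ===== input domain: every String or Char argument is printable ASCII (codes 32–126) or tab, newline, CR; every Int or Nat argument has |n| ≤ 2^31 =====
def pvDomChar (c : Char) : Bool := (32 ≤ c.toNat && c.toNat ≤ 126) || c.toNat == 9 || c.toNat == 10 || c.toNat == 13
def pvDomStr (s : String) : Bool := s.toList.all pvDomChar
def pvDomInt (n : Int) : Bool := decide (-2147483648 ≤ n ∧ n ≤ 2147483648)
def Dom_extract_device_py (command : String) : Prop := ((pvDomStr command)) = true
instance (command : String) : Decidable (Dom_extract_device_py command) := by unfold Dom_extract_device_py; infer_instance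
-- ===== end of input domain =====

-- B replaces A's word-major scan by a keyword-major scan (index per keyword, keep the smallest);
-- objective: alternative decomposition, same cost. Return value only; no mutation in either program.

-- shared constant: the keyword list (a literal in both Pythons)
def pvKws : List String := ["light", "lights", "lamp", "switch", "thermostat", "door", "camera"]

-- shared formatting of the result: f"{' '.join(words[max(0,i-2):i])} {w}".strip()
def pvFmt (words : List String) (i : Int) (w : String) : String :=
  PySem.Str.strip (PySem.Str.join " "
    [PySem.Str.join " " (PySem.List.slice words (some (max 0 (i - 2))) (some i)), w])

-- ===== PORT A =====
-- A's loop over enumerate(words): return at the first word that is a keyword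
def aGo (words : List String) : List (Int × String) → String
  | [] => "device"
  | (i, w) :: rest => if w ∈ pvKws then pvFmt words i w else aGo words rest

def extract_device_py (command : String) : String :=
  let words := PySem.Str.split₀ (PySem.Str.lower command)
  aGo words (PySem.List.enumerate words 0)

-- ===== PORT B =====
-- B's loop body: for each keyword, its first position via words.index; keep the smallest (index, keyword)
def bStep (words : List String) (best : Option (Nat × String)) (kw : String) : Option (Nat × String) :=
  if kw ∈ words then
    match PySem.List.index? words kw with
    | some i =>
      match best with
      | none => some (i, kw)
      | some b => if i < b.1 then some (i, kw) else best
    | none => best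
  else best

def extract_device_py_alt (command : String) : String :=
  let words := PySem.Str.split₀ (PySem.Str.lower command)
  match pvKws.foldl (bStep words) none with
  | none => "device"
  | some (i, w) => pvFmt words (i : Int) w

-- ===== PRECONDITION & SPEC =====
def Spec_extract_device_py (command : String) (out : String) : Prop := out = extract_device_py_alt command
instance (command : String) (out : String) : Decidable (Spec_extract_device_py command out) := by unfold Spec_extract_device_py; infer_instance

-- ===== CLAIM (what is proved, stated in full; the proofs are below) =====
def Claim_equal_extract_device_py : Prop := ∀ (command : String), Dom_extract_device_py command → Spec_extract_device_py command (extract_device_py command)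

-- ===== LEMMAS AND PROOFS =====

-- A's scan returns according to the first index whose word is a keyword
theorem aGo_enum (full : List String) : ∀ (words : List String) (s : Int),
    aGo full (PySem.List.enumerate words s) =
      match words.findIdx? (fun w => decide (w ∈ pvKws)) with
      | none => "device"
      | some k => pvFmt full (s + (k : Int)) (words.getD k "") := by
  intro words
  induction words with
  | nil => intro s; simp [PySem.List.enumerate_nil, aGo]
  | cons w ws ih =>
    intro s
    rw [PySem.List.enumerate_cons]
    by_cases hw : w ∈ pvKws
    · simp [aGo, hw, List.findIdx?_cons]
    · simp only [aGo, ih (s + 1), List.findIdx?_cons, decide_eq_true_eq, if_neg hw]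
      cases hfi : ws.findIdx? (fun w => decide (w ∈ pvKws)) with
      | none => simp
      | some k =>
        simp only [Option.map_some]
        have harg : s + 1 + (k : Int) = s + ((k + 1 : Nat) : Int) := by push_cast; ring
        rw [harg]
        rfl

-- the fold does nothing when no keyword occurs in words
theorem bFold_none (words : List String) : ∀ (l : List String) (best : Option (Nat × String)),
    (∀ kw ∈ l, kw ∉ words) → l.foldl (bStep words) best = best := by
  intro l
  induction l with
  | nil => intro best _; rfl
  | cons kw rest ih =>
    intro best h
    have hkw : kw ∉ words := h kw (List.mem_cons_self)
    simp only [List.foldl_cons, bStep, if_neg hkw]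
    exact ih best (fun x hx => h x (List.mem_cons_of_mem _ hx))

-- the fold invariant when the first keyword occurrence is at index k with word w₀
theorem bFold_hit (words : List String) (k : Nat) (w₀ : String)
    (hF1 : PySem.List.index? words w₀ = some k)
    (hF2 : ∀ kw ∈ pvKws, ∀ j, PySem.List.index? words kw = some j → k ≤ j ∧ (j = k → kw = w₀)) :
    ∀ (l : List String) (best : Option (Nat × String)),
      (∀ kw ∈ l, kw ∈ pvKws) →
      ((w₀ ∈ l ∧ (best = none ∨ ∃ j w, best = some (j, w) ∧ k < j)) ∨ best = some (k, w₀)) →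
      l.foldl (bStep words) best = some (k, w₀) := by
  intro l
  induction l with
  | nil =>
    intro best _ hinv
    rcases hinv with ⟨hmem, _⟩ | hbest
    · exact absurd hmem (List.not_mem_nil)
    · simpa [List.foldl_nil] using hbest
  | cons kw rest ih =>
    intro best hsub hinv
    have hkwK : kw ∈ pvKws := hsub kw (List.mem_cons_self)
    have hsub' : ∀ x ∈ rest, x ∈ pvKws := fun x hx => hsub x (List.mem_cons_of_mem _ hx)
    have hw₀mem : w₀ ∈ words := (PySem.List.index?_isSome_iff words w₀).mp (by rw [hF1]; rfl)
    simp only [List.foldl_cons]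
    by_cases hmem : kw ∈ words
    · obtain ⟨j, hj⟩ : ∃ j, PySem.List.index? words kw = some j := by
        have := (PySem.List.index?_isSome_iff words kw).mpr hmem
        exact Option.isSome_iff_exists.mp this
      obtain ⟨hkj, hjk⟩ := hF2 kw hkwK j hj
      have hj' : List.idxOf? kw words = some j := by
        rw [PySem.List.index?_eq_idxOf?] at hj; exact hj
      by_cases heq : kw = w₀
      · subst heq
        have hjkk : j = k := by rw [hF1] at hj; exact Option.some_inj.mp hj.symm
        subst hjkk
        apply ih _ hsub'
        right
        rcases hinv with ⟨_, hb⟩ | hb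
        · rcases hb with hb | ⟨j', w', hb, hlt⟩
          · simp [bStep, if_pos hmem, hj', hb]
          · simp [bStep, if_pos hmem, hj', hb, hlt]
        · simp [bStep, hj', hb]
      · have hkltj : k < j := lt_of_le_of_ne hkj (fun h => heq (hjk h.symm))
        rcases hinv with ⟨hmw₀, hb⟩ | hb
        · have hw₀rest : w₀ ∈ rest := by
            rcases List.mem_cons.mp hmw₀ with h | h
            · exact absurd h.symm heq
            · exact h
          apply ih _ hsub'
          left
          refine ⟨hw₀rest, ?_⟩
          rcases hb with hb | ⟨j', w', hb, hlt⟩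
          · right; exact ⟨j, kw, by simp [bStep, if_pos hmem, hj', hb], hkltj⟩
          · by_cases hjj : j < j'
            · right; exact ⟨j, kw, by simp [bStep, if_pos hmem, hj', hb, hjj], hkltj⟩
            · right; exact ⟨j', w', by simp [bStep, hj', hb, hjj], hlt⟩
        · apply ih _ hsub'
          right
          have hnlt : ¬ j < k := Nat.not_lt.mpr (Nat.le_of_lt hkltj)
          simp [bStep, hj', hb, hnlt]
    · apply ih _ hsub'
      rcases hinv with ⟨hmw₀, hb⟩ | hb
      · left
        refine ⟨?_, by simpa [bStep, if_neg hmem] using hb⟩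
        rcases List.mem_cons.mp hmw₀ with h | h
        · exact absurd (h ▸ hw₀mem) hmem
        · exact h
      · simp [bStep, if_neg hmem, hb]

-- B's fold computes (first keyword index, word there)
theorem bFold_char (words : List String) :
    pvKws.foldl (bStep words) none =
      match words.findIdx? (fun w => decide (w ∈ pvKws)) with
      | none => none
      | some k => some (k, words.getD k "") := by
  cases hfi : words.findIdx? (fun w => decide (w ∈ pvKws)) with
  | none =>
    have hno : ∀ w ∈ words, w ∉ pvKws := by
      intro w hw
      have := List.findIdx?_eq_none_iff.mp hfi w hw
      simpa using this
    exact bFold_none words pvKws none (fun kw hkw hmem => hno kw hmem hkw)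
  | some k =>
    obtain ⟨hk, hPk, hmin⟩ := List.findIdx?_eq_some_iff_getElem.mp hfi
    have hgd : words.getD k "" = words[k] := List.getD_eq_getElem words "" hk
    have hPk' : words[k] ∈ pvKws := by simpa using hPk
    have hmin' : ∀ j (hj : j < k), words[j] ∉ pvKws := by
      intro j hj
      have := hmin j hj
      simpa using this
    have hF1 : PySem.List.index? words words[k] = some k := by
      rw [PySem.List.index?_eq_some_iff]
      refine ⟨words.take k, words.drop (k + 1), ?_, List.length_take_of_le (Nat.le_of_lt hk), ?_⟩
      · exact (List.getElem_cons_drop hk ▸ (List.take_append_drop k words).symm)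
      · intro hmem
        obtain ⟨j, hjlt, hje⟩ := List.mem_take_iff_getElem.mp hmem
        have hjk : j < k := by omega
        exact hmin' j hjk (hje ▸ hPk')
    have hF2 : ∀ kw ∈ pvKws, ∀ j, PySem.List.index? words kw = some j →
        k ≤ j ∧ (j = k → kw = words[k]) := by
      intro kw hkw j hj
      obtain ⟨hjlt, hje, _⟩ := PySem.List.getElem_of_index?_eq_some hj
      constructor
      · by_contra hlt
        exact hmin' j (Nat.lt_of_not_le hlt) (hje ▸ hkw)
      · intro hjk; subst hjk; exact hje.symm
    show List.foldl (bStep words) none pvKws = some (k, words.getD k "")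
    rw [hgd]
    exact bFold_hit words k words[k] hF1 hF2 pvKws none (fun _ h => h) (Or.inl ⟨hPk', Or.inl rfl⟩)

-- ===== VERDICT (by name: the statement is the Claim_ definition above) =====
theorem extract_device_py_spec : Claim_equal_extract_device_py := by
  intro command _
  unfold Spec_extract_device_py extract_device_py extract_device_py_alt
  show aGo (PySem.Str.split₀ (PySem.Str.lower command))
      (PySem.List.enumerate (PySem.Str.split₀ (PySem.Str.lower command)) 0) =
    match List.foldl (bStep (PySem.Str.split₀ (PySem.Str.lower command))) none pvKws with
    | none => "device"
    | some (i, w) => pvFmt (PySem.Str.split₀ (PySem.Str.lower command)) (i : Int) w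
  rw [aGo_enum, bFold_char]
  cases (PySem.Str.split₀ (PySem.Str.lower command)).findIdx? (fun w => decide (w ∈ pvKws)) with
  | none => rfl
  | some k => simp
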